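-- pv_equiv track=rewrite | github.com/jgregoriods/santiago-staff | src/nearest_neighbor.py | glyph_bound
-- ===== SOURCE A (Python) =====
-- def glyph_bound(glyph, text):
--     start = end = None
--     for i, line in enumerate(text):
--         for j in range(len(line) - len(glyph) + 1):
--             if glyph == line[j:j + len(glyph)]:
--                 if start is None:
--                     start = i
--                 end = i
--     return (start, end)
-- ===== SOURCE B (Python) =====
-- def glyph_bound(glyph, text):
--     def first_hit(lines):
--         for i, line in enumerate(lines):
--             if glyph in line:
--                 return i
--         return None
--
--     lo = first_hit(text)
--     if lo is None:
--         return (None, None)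
--     return (lo, len(text) - 1 - first_hit(text[::-1]))
-- ===== Notes on version B (the rewrite author's own statement) =====
-- stated objective: faster
-- what changed: Replaces A's exhaustive sentinel-tracking scan of every offset of every line by two early-returning staged searches: a forward first-hit scan for the start, then a first-hit scan of the reversed list whose index is mapped back by len-1-j for the end.
import Mathlib
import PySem

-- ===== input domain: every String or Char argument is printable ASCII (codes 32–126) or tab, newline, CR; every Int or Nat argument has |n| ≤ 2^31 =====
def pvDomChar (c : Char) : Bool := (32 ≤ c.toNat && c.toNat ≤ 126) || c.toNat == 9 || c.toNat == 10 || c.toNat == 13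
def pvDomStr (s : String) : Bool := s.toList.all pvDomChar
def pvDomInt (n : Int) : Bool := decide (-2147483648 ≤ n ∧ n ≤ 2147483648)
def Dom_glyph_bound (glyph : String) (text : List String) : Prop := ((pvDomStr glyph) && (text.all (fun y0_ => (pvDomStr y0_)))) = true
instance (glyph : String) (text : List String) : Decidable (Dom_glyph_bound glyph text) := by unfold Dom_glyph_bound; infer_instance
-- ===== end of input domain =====

-- B replaces A's exhaustive sentinel-tracking scan of every offset of every line by two
-- early-returning staged first-hit searches (forward for the start, over the reversed list,
-- index mapped back by len-1-j, for the end): an alternative decomposition.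


-- ===== PORT A =====
-- start = end = None; for i, line in enumerate(text): for j in range(len(line)-len(glyph)+1):
--   if glyph == line[j:j+len(glyph)]: if start is None: start = i; end = i
def glyph_bound (glyph : String) (text : List String) : Option Int × Option Int :=
  (PySem.List.enumerate text).foldl
    (fun st p =>
      (PySem.List.pyRange 0 (PySem.Str.len p.2 - PySem.Str.len glyph + 1)).foldl
        (fun st j =>
          if glyph = PySem.Str.slice p.2 (some j) (some (j + PySem.Str.len glyph)) then
            ((if st.1 = none then some p.1 else st.1), some p.1)
          else st) st)
    (none, none)

-- ===== PORT B =====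
-- def first_hit(lines): for i, line in enumerate(lines): if glyph in line: return i; return None
def firstHitB (glyph : String) : List (Int × String) → Option Int
  | [] => none
  | p :: rest => if PySem.Str.isIn glyph p.2 then some p.1 else firstHitB glyph rest

-- lo = first_hit(text); if lo is None: return (None, None)
-- return (lo, len(text) - 1 - first_hit(text[::-1]))
def glyph_bound_alt (glyph : String) (text : List String) : Option Int × Option Int :=
  match firstHitB glyph (PySem.List.enumerate text) with
  | none => (none, none)
  | some lo =>
    match firstHitB glyph (PySem.List.enumerate ((PySem.List.slice? text none none (-1)).getD [])) with
    | none => (some lo, none)  -- unreachable (the Python would raise here; never happens): totality fallback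
    | some j => (some lo, some ((text.length : Int) - 1 - j))

-- ===== PRECONDITION & SPEC =====
def Spec_glyph_bound (glyph : String) (text : List String) (out : Option Int × Option Int) : Prop := out = glyph_bound_alt glyph text
instance (glyph : String) (text : List String) (out : Option Int × Option Int) : Decidable (Spec_glyph_bound glyph text out) := by unfold Spec_glyph_bound; infer_instance

-- ===== CLAIM (what is proved, stated in full; the proofs are below) =====
def Claim_equal_glyph_bound : Prop := ∀ (glyph : String) (text : List String), Dom_glyph_bound glyph text → Spec_glyph_bound glyph text (glyph_bound glyph text)

-- ===== LEMMAS AND PROOFS =====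

-- A's inner offset loop: if any offset matches, the state becomes (st.1 or (some i), some i); else unchanged.
theorem foldl_mark (P : Int → Bool) (L : List Int) (i : Int) (st : Option Int × Option Int) :
    L.foldl (fun st j => if P j then ((if st.1 = none then some i else st.1), some i) else st) st
    = if L.any P then (st.1.or (some i), some i) else st := by
  induction L generalizing st with
  | nil => simp
  | cons j L ih =>
    simp only [List.foldl_cons, List.any_cons]
    by_cases h : P j = true
    · rw [if_pos h, ih, if_pos (show (P j || L.any P) = true by simp [h])]
      split
      · cases st.1 <;> simp [Option.or]
      · cases st.1 <;> simp [Option.or]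
    · rw [if_neg h, ih]
      simp [h]

-- "some offset slice equals glyph" is exactly Python's substring test `glyph in line`.
theorem any_match_iff (glyph line : String) :
    ((PySem.List.pyRange 0 (PySem.Str.len line - PySem.Str.len glyph + 1)).any
      (fun j => decide (glyph = PySem.Str.slice line (some j) (some (j + PySem.Str.len glyph)))))
    = PySem.Str.isIn glyph line := by
  rw [Bool.eq_iff_iff]
  rw [List.any_eq_true]
  rw [PySem.Str.isIn_iff_infix]
  rw [← PySem.Chars.isIn_iff_infix, ← PySem.Chars.exists_prefix_drop_iff_isIn]
  constructor
  · rintro ⟨j, hj, hmatch⟩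
    rw [PySem.List.mem_pyRange_one] at hj
    rw [decide_eq_true_eq] at hmatch
    refine ⟨j.toNat, ?_⟩
    have h0 : (0:Int) ≤ j := hj.1
    have hG : (0:Int) ≤ PySem.Str.len glyph := by rw [PySem.Str.len_eq]; positivity
    have : (PySem.Str.slice line (some j) (some (j + PySem.Str.len glyph))).toList
        = PySem.List.slice line.toList (some j) (some (j + PySem.Str.len glyph)) := by
      simp [PySem.Str.slice]
    rw [congrArg String.toList hmatch, this,
        PySem.List.slice_toNat line.toList h0 (by omega)] at *
    have hlen : (j + PySem.Str.len glyph).toNat - j.toNat = glyph.toList.length := by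
      rw [PySem.Str.len_eq] at *; omega
    rw [hlen] at *
    exact (List.prefix_iff_eq_take.mpr (by simpa using hmatch))
  · rintro ⟨j, hj⟩
    by_cases hG : glyph.toList.length = 0
    · refine ⟨0, ?_, ?_⟩
      · rw [PySem.List.mem_pyRange_one]
        refine ⟨le_refl 0, ?_⟩
        rw [PySem.Str.len_eq, PySem.Str.len_eq]; omega
      · rw [decide_eq_true_eq]
        apply String.toList_inj.mp
        have hsl : (PySem.Str.slice line (some 0) (some (0 + PySem.Str.len glyph))).toList
            = PySem.List.slice line.toList (some 0) (some (0 + PySem.Str.len glyph)) := by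
          simp [PySem.Str.slice]
        have hz : PySem.Str.len glyph = 0 := by rw [PySem.Str.len_eq]; omega
        rw [hsl, hz, PySem.List.slice_toNat line.toList (le_refl 0) (by norm_num)]
        simp [List.length_eq_zero_iff.mp hG]
    · have hpre := hj
      have hlenle : glyph.toList.length ≤ line.toList.length - j := by
        have h1 := List.IsPrefix.length_le hpre
        simp only [List.length_drop] at h1
        omega
      have hjle : j + glyph.toList.length ≤ line.toList.length := by omega
      refine ⟨(j : Int), ?_, ?_⟩
      · rw [PySem.List.mem_pyRange_one, PySem.Str.len_eq, PySem.Str.len_eq]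
        constructor
        · positivity
        · omega
      · rw [decide_eq_true_eq]
        apply String.toList_inj.mp
        have : (PySem.Str.slice line (some (j:Int)) (some ((j:Int) + PySem.Str.len glyph))).toList
            = PySem.List.slice line.toList (some (j:Int)) (some ((j:Int) + PySem.Str.len glyph)) := by
          simp [PySem.Str.slice]
        rw [this, PySem.List.slice_toNat line.toList (by positivity)
            (by rw [PySem.Str.len_eq]; positivity)]
        have hlen : ((j:Int) + PySem.Str.len glyph).toNat - ((j:Int)).toNat = glyph.toList.length := by
          rw [PySem.Str.len_eq]; omega
        rw [hlen]
        exact List.prefix_iff_eq_take.mp hpre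

-- A's outer loop over enumerated lines versus the endpoints of the matching-index list.
theorem foldl_lines (glyph : String) (xs : List String) (s : Int) (st : Option Int × Option Int) :
    (PySem.List.enumerate xs s).foldl
      (fun st p =>
        (PySem.List.pyRange 0 (PySem.Str.len p.2 - PySem.Str.len glyph + 1)).foldl
          (fun st j =>
            if glyph = PySem.Str.slice p.2 (some j) (some (j + PySem.Str.len glyph)) then
              ((if st.1 = none then some p.1 else st.1), some p.1)
            else st) st) st
    = (st.1.or ((((PySem.List.enumerate xs s).filter (fun p => PySem.Str.isIn glyph p.2)).map Prod.fst).head?),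
       (((((PySem.List.enumerate xs s).filter (fun p => PySem.Str.isIn glyph p.2)).map Prod.fst).getLast?).or st.2)) := by
  induction xs generalizing s st with
  | nil => simp [PySem.List.enumerate_nil]
  | cons line xs ih =>
    rw [PySem.List.enumerate_cons]
    simp only [List.foldl_cons]
    have hinner :
        (PySem.List.pyRange 0 (PySem.Str.len line - PySem.Str.len glyph + 1)).foldl
          (fun st j =>
            if glyph = PySem.Str.slice line (some j) (some (j + PySem.Str.len glyph)) then
              ((if st.1 = none then some s else st.1), some s)
            else st) st
        = if PySem.Str.isIn glyph line then (st.1.or (some s), some s) else st := by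
      have := foldl_mark
        (fun j => decide (glyph = PySem.Str.slice line (some j) (some (j + PySem.Str.len glyph))))
        (PySem.List.pyRange 0 (PySem.Str.len line - PySem.Str.len glyph + 1)) s st
      simp only [decide_eq_true_eq] at this
      rw [this, any_match_iff]
    rw [hinner]
    by_cases h : PySem.Str.isIn glyph line = true
    · rw [if_pos h, ih]
      rw [List.filter_cons, if_pos (by simp only [h])]
      simp only [List.map_cons, List.head?_cons]
      refine Prod.ext ?_ ?_
      · simp [Option.some_or]
      · cases hh : (((PySem.List.enumerate xs (s+1)).filter
            (fun p => PySem.Str.isIn glyph p.2)).map Prod.fst) with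
        | nil => simp
        | cons a l => simp [List.getLast?_cons, Option.some_or]
    · rw [if_neg h, ih]
      rw [List.filter_cons, if_neg (by simpa using h)]

-- The head of the matching-index list is findIdx?, shifted by the enumeration start.
theorem head_hits (glyph : String) (xs : List String) (s : Int) :
    (((PySem.List.enumerate xs s).filter (fun p => PySem.Str.isIn glyph p.2)).map Prod.fst).head?
    = (xs.findIdx? (fun l => PySem.Str.isIn glyph l)).map (fun i => s + (i : Int)) := by
  induction xs generalizing s with
  | nil => simp [PySem.List.enumerate_nil]
  | cons line xs ih =>
    rw [PySem.List.enumerate_cons, List.filter_cons, List.findIdx?_cons]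
    by_cases h : PySem.Chars.isIn glyph.toList line.toList = true
    · simp [h]
    · simp only [PySem.Str.isIn_eq] at ih
      simp only [PySem.Str.isIn_eq, h, Bool.false_eq_true, if_false]
      rw [ih]
      cases xs.findIdx? (fun l => PySem.Chars.isIn glyph.toList l.toList) <;> simp
      omega

-- The last of the matching-index list is findIdx? over the REVERSED lines, mapped back by len-1-j.
theorem last_hits (glyph : String) (xs : List String) (s : Int) :
    (((PySem.List.enumerate xs s).filter (fun p => PySem.Str.isIn glyph p.2)).map Prod.fst).getLast?
    = (xs.reverse.findIdx? (fun l => PySem.Str.isIn glyph l)).map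
        (fun j => s + (xs.length : Int) - 1 - (j : Int)) := by
  induction xs generalizing s with
  | nil => simp [PySem.List.enumerate_nil]
  | cons line xs ih =>
    simp only [PySem.Str.isIn_eq] at ih ⊢
    rw [PySem.List.enumerate_cons, List.filter_cons, List.reverse_cons, List.findIdx?_append]
    by_cases hrec : xs.reverse.findIdx? (fun l => PySem.Chars.isIn glyph.toList l.toList) = none
    · have hthis := ih (s + 1)
      rw [hrec] at hthis
      have hnil := List.getLast?_eq_none_iff.mp hthis
      rw [hrec, Option.none_or]
      by_cases h : PySem.Chars.isIn glyph.toList line.toList = true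
      · simp only [h, if_true, List.map_cons]
        rw [List.getLast?_cons, hnil]
        simp [List.findIdx?_cons, h]
        omega
      · simp only [h, Bool.false_eq_true, if_false]
        rw [ih, hrec]
        simp [List.findIdx?_cons, h]
    · obtain ⟨j, hj⟩ := Option.ne_none_iff_exists'.mp hrec
      rw [hj, Option.some_or]
      have hlast := ih (s + 1)
      rw [hj] at hlast
      by_cases h : PySem.Chars.isIn glyph.toList line.toList = true
      · simp only [h, if_true, List.map_cons]
        rw [List.getLast?_cons, hlast]
        simp
        omega
      · simp only [h, Bool.false_eq_true, if_false]
        rw [ih, hj]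
        simp
        omega

-- B's first_hit over an enumerated list is findIdx?, shifted by the enumeration start.
theorem firstHitB_eq (glyph : String) (xs : List String) (s : Int) :
    firstHitB glyph (PySem.List.enumerate xs s)
    = (xs.findIdx? (fun l => PySem.Str.isIn glyph l)).map (fun i => s + (i : Int)) := by
  induction xs generalizing s with
  | nil => simp [PySem.List.enumerate_nil, firstHitB]
  | cons line xs ih =>
    rw [PySem.List.enumerate_cons, List.findIdx?_cons]
    by_cases h : PySem.Chars.isIn glyph.toList line.toList = true
    · simp [firstHitB, h]
    · simp only [PySem.Str.isIn_eq] at ih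
      simp only [firstHitB, PySem.Str.isIn_eq, h, Bool.false_eq_true, if_false]
      rw [ih]
      cases xs.findIdx? (fun l => PySem.Chars.isIn glyph.toList l.toList) <;> simp
      omega

-- ===== VERDICT (by name: the statement is the Claim_ definition above) =====
theorem glyph_bound_spec : Claim_equal_glyph_bound := by
  intro glyph text _
  unfold Spec_glyph_bound glyph_bound glyph_bound_alt
  rw [foldl_lines, PySem.List.slice?_none_none_neg_one]
  simp only [Option.getD_some, Option.none_or, Option.or_none]
  rw [head_hits, last_hits, firstHitB_eq, firstHitB_eq]
  cases hf : text.findIdx? (fun l => PySem.Str.isIn glyph l) with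
  | none =>
    have hr : text.reverse.findIdx? (fun l => PySem.Str.isIn glyph l) = none := by
      rw [List.findIdx?_eq_none_iff] at hf ⊢
      intro x hx
      exact hf x (List.mem_reverse.mp hx)
    rw [hr]
    simp
  | some i =>
    have hr : text.reverse.findIdx? (fun l => PySem.Str.isIn glyph l) ≠ none := by
      intro hnone
      rw [List.findIdx?_eq_none_iff] at hnone
      have hi := List.findIdx?_eq_some_iff_findIdx_eq.mp hf
      simp only [PySem.Str.isIn_eq] at hi
      have hmem : PySem.Str.isIn glyph text[i] = true := by
        have h2 := List.findIdx_getElem (xs := text) (p := fun l => PySem.Str.isIn glyph l)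
          (w := by simp only [PySem.Str.isIn_eq]; rw [hi.2]; exact hi.1)
        simpa [hi.2] using h2
      have hfalse := hnone text[i] (List.mem_reverse.mpr (List.getElem_mem _))
      rw [hmem] at hfalse
      simp at hfalse
    obtain ⟨j, hj⟩ := Option.ne_none_iff_exists'.mp hr
    rw [hj]
    simp
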